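-- pv_equiv track=rewrite | github.com/changlin31/BossNAS | searching/bossnas/models/supernets/hytra_supernet.py | all_op_encoding
-- ===== SOURCE A (Python) =====
-- def get_path(str, num):
--     if (num == 1):
--         for x in str:
--             yield x
--     else:
--         for x in str:
--             for y in get_path(str, num - 1):
--                 yield x + y
--
-- def all_op_encoding(num_of_ops, layers):
--     # return alist
--     encodings = []
--     strKey = ""
--     for x in range(num_of_ops):
--         strKey += str(x)
--     for path in get_path(strKey, layers):
--         encodings.append([int(op) for op in path])
--     return encodings
-- ===== SOURCE B (Python) =====
-- def all_op_encoding(num_of_ops, layers):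
--     # Mixed-radix counting instead of recursive cartesian enumeration.
--     strKey = ""
--     for x in range(num_of_ops):
--         strKey += str(x)
--     base = len(strKey)
--     if base == 0:
--         return []
--     encodings = []
--     for i in range(base ** layers):
--         digits = []
--         for _ in range(layers):
--             digits.append(i % base)
--             i //= base
--         digits.reverse()
--         encodings.append([int(strKey[d]) for d in digits])
--     return encodings
-- ===== Notes on version B (the rewrite author's own statement) =====
-- stated objective: alternative
-- what changed: B replaces A's recursive generator cartesian product over strKey with arithmetic mixed-radix counting: it enumerates i in range(base**layers) and decodes each i into `layers` base-`base` digits (most-significant first), indexing strKey per digit.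
import Mathlib
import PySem

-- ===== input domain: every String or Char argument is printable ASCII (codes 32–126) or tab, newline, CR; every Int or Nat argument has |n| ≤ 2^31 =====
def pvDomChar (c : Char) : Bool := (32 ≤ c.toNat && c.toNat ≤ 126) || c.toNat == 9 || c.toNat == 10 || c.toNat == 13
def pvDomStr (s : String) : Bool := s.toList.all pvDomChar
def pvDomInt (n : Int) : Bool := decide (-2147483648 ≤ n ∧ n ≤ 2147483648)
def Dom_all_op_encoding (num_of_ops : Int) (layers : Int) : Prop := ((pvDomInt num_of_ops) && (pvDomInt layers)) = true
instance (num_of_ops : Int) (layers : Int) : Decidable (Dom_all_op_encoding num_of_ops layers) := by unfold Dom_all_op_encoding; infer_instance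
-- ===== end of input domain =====

-- B enumerates the op-index sequences by mixed-radix counting instead of A's recursive
-- generator cartesian product; equal wherever A returns (A raises RecursionError for
-- num_of_ops ≥ 1 ∧ layers ≤ 0, excluded by Pre_).

-- ===== PORT A =====
-- get_path(str, num): num is ported through a Nat fuel (= num.toNat); at fuel 0 the Python
-- recursion never terminates when the string is nonempty (RecursionError, outside Pre_),
-- so the value [] returned there is a guard, not a claim.
def getPath (s : List Char) : Nat → List (List Char)
  | 0 => []
  | 1 => s.map (fun x => [x])
  | (n+2) => s.flatMap (fun x => (getPath s (n+1)).map (fun y => x :: y))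

def all_op_encoding (num_of_ops : Int) (layers : Int) : List (List Int) :=
  let strKey : List Char :=
    (PySem.List.pyRange 0 num_of_ops 1).foldl (fun acc x => acc ++ (PySem.Int.toStr x).toList) []
  -- int(op) never fails here: every op is a decimal digit character, so getD 0 is never taken
  (getPath strKey layers.toNat).map (fun path =>
    path.map (fun op => (PySem.Int.ofChars? [op]).getD 0))

-- ===== PORT B =====
-- the inner 'for _ in range(layers): digits.append(i % base); i //= base' loop
def decodeRev (base : Int) : Nat → Int → List Int
  | 0, _ => []
  | (n+1), i => PySem.Int.mod i base :: decodeRev base n (PySem.Int.floordiv i base)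

def all_op_encoding_alt (num_of_ops : Int) (layers : Int) : List (List Int) :=
  let strKey : List Char :=
    (PySem.List.pyRange 0 num_of_ops 1).foldl (fun acc x => acc ++ (PySem.Int.toStr x).toList) []
  let base : Int := strKey.length
  if base = 0 then []
  else
    -- base ** layers: layers ≥ 0 on every admitted input (Pre_ requires layers ≥ 1 unless strKey is empty), so ^ layers.toNat is exact
    (PySem.List.pyRange 0 (base ^ layers.toNat) 1).map (fun i =>
      ((decodeRev base layers.toNat i).reverse).map (fun d =>
        (PySem.Int.ofChars? [(PySem.List.pyGet? strKey d).getD ' ']).getD 0))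

-- ===== PRECONDITION & SPEC =====
-- Pre_ excludes exactly num_of_ops ≥ 1 ∧ layers ≤ 0, where Python A raises RecursionError
-- (get_path(str, num) with num ≠ 1 recurses on num - 1 forever).
def Pre_all_op_encoding (num_of_ops : Int) (layers : Int) : Prop := 1 ≤ layers ∨ num_of_ops ≤ 0
instance (num_of_ops : Int) (layers : Int) : Decidable (Pre_all_op_encoding num_of_ops layers) := by
  unfold Pre_all_op_encoding; infer_instance

def pvWitness_all_op_encoding : Int × Int := (3, 2)

def Spec_all_op_encoding (num_of_ops : Int) (layers : Int) (out : List (List Int)) : Prop := out = all_op_encoding_alt num_of_ops layers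
instance (num_of_ops : Int) (layers : Int) (out : List (List Int)) : Decidable (Spec_all_op_encoding num_of_ops layers out) := by unfold Spec_all_op_encoding; infer_instance

-- ===== CLAIM (what is proved, stated in full; the proofs are below) =====
def Claim_equal_all_op_encoding : Prop := ∀ (num_of_ops : Int) (layers : Int), Dom_all_op_encoding num_of_ops layers → Pre_all_op_encoding num_of_ops layers → Spec_all_op_encoding num_of_ops layers (all_op_encoding num_of_ops layers)

-- ===== LEMMAS AND PROOFS =====

-- Nat-level decoding of i into k base-b digits, least-significant first
def decodeNat (b : Nat) : Nat → Nat → List Nat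
  | 0, _ => []
  | (k+1), i => i % b :: decodeNat b k (i / b)

lemma getPath_nil (k : Nat) : getPath [] k = [] := by
  match k with
  | 0 => rfl
  | 1 => rfl
  | (n+2) => rfl

lemma range_mul (a c : Nat) :
    List.range (a * c) = (List.range a).flatMap (fun q => (List.range c).map (fun r => q * c + r)) := by
  induction a with
  | zero => simp
  | succ a ih =>
    rw [Nat.succ_mul, List.range_add, List.range_succ, List.flatMap_append, ← ih]
    simp

lemma decodeNat_split (b : Nat) (m q r : Nat) (hq : q < b) (hr : r < b ^ m) :
    decodeNat b (m+1) (q * b ^ m + r) = decodeNat b m r ++ [q] := by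
  have hb : 0 < b := by omega
  induction m generalizing r with
  | zero =>
    have hr0 : r = 0 := by simpa using hr
    subst hr0
    simp [decodeNat, Nat.mod_eq_of_lt hq]
  | succ m ih =>
    have h1 : (q * b ^ (m+1) + r) % b = r % b := by
      rw [pow_succ, ← mul_assoc]
      exact Nat.mul_add_mod' _ _ _
    have h2 : (q * b ^ (m+1) + r) / b = q * b ^ m + r / b := by
      have : q * b ^ (m+1) + r = b * (q * b ^ m) + r := by ring
      rw [this, Nat.mul_add_div hb]
    have h3 : r / b < b ^ m := by
      rw [Nat.div_lt_iff_lt_mul hb, ← pow_succ]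
      exact hr
    show (q * b ^ (m+1) + r) % b :: decodeNat b (m+1) ((q * b ^ (m+1) + r) / b)
        = decodeNat b (m+1) r ++ [q]
    rw [h1, h2, ih _ h3]
    simp [decodeNat]

lemma self_eq_range_map_getD (s : List Char) :
    s = (List.range s.length).map (fun q => s.getD q ' ') := by
  apply List.ext_getElem
  · simp
  · intro i h1 h2
    simp [List.getD_eq_getElem?_getD, h1]

lemma decodeNat_lt (b : Nat) (hb : 0 < b) : ∀ (k i : Nat), ∀ d ∈ decodeNat b k i, d < b := by
  intro k
  induction k with
  | zero => intro i d hd; simp [decodeNat] at hd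
  | succ k ih =>
    intro i d hd
    simp only [decodeNat, List.mem_cons] at hd
    rcases hd with rfl | hd
    · exact Nat.mod_lt _ hb
    · exact ih _ _ hd

lemma flatMap_idx {α : Type} (s : List Char) (g : Char → List α) :
    s.flatMap g = (List.range s.length).flatMap (fun q => g (s.getD q ' ')) := by
  conv_lhs => rw [self_eq_range_map_getD s]
  rw [List.flatMap_map]

lemma getPath_eq (s : List Char) : ∀ (n : Nat),
    getPath s (n+1) = (List.range (s.length ^ (n+1))).map
      (fun i => ((decodeNat s.length (n+1) i).reverse).map (fun d => s.getD d ' ')) := by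
  intro n
  induction n with
  | zero =>
    show s.map (fun x => [x]) = _
    conv_lhs => rw [self_eq_range_map_getD s]
    rw [List.map_map, pow_one]
    apply List.map_congr_left
    intro i hi
    have hib : i < s.length := List.mem_range.mp hi
    simp [decodeNat, Nat.mod_eq_of_lt hib]
  | succ n ih =>
    show s.flatMap (fun x => (getPath s (n+1)).map (fun y => x :: y)) = _
    rw [flatMap_idx, ih]
    have hpow : s.length ^ (n+1+1) = s.length * s.length ^ (n+1) := by ring
    rw [hpow, range_mul, List.map_flatMap]
    apply List.flatMap_congr
    intro q hq
    rw [List.map_map, List.map_map]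
    apply List.map_congr_left
    intro r hr
    have hqb : q < s.length := List.mem_range.mp hq
    have hrb : r < s.length ^ (n+1) := List.mem_range.mp hr
    simp only [Function.comp_apply]
    rw [decodeNat_split s.length (n+1) q r hqb hrb]
    simp

lemma decodeRev_natCast (b : Nat) : ∀ (k : Nat) (i : Nat),
    decodeRev (b : Int) k (i : Int) = (decodeNat b k i).map (Nat.cast : Nat → Int) := by
  intro k
  induction k with
  | zero => intro i; rfl
  | succ k ih =>
    intro i
    show PySem.Int.mod (i : Int) (b : Int) :: decodeRev (b : Int) k (PySem.Int.floordiv (i : Int) (b : Int))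
        = ((i % b : Nat) : Int) :: (decodeNat b k (i / b)).map (Nat.cast : Nat → Int)
    rw [PySem.Int.mod_natCast, PySem.Int.floordiv_natCast, ih]

-- ===== VERDICT (by name: the statement is the Claim_ definition above) =====
theorem all_op_encoding_spec : Claim_equal_all_op_encoding := by
  intro n l _ hpre
  unfold Spec_all_op_encoding
  simp only [all_op_encoding, all_op_encoding_alt]
  set s : List Char :=
    (PySem.List.pyRange 0 n 1).foldl (fun acc x => acc ++ (PySem.Int.toStr x).toList) [] with hsdef
  by_cases hs : s = []
  · simp [hs, getPath_nil]
  · have hb : 0 < s.length := List.length_pos_iff.mpr hs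
    have hl : 1 ≤ l := by
      rcases hpre with h | h
      · exact h
      · exfalso
        apply hs
        rw [hsdef, PySem.List.pyRange_one]
        have h0 : (n - 0).toNat = 0 := by omega
        rw [h0]
        rfl
    obtain ⟨m, hm⟩ : ∃ m, l.toNat = m + 1 := ⟨l.toNat - 1, by omega⟩
    rw [if_neg (by exact_mod_cast hb.ne')]
    rw [hm, getPath_eq s m]
    have hcast : ((s.length : Int)) ^ (m+1) = ((s.length ^ (m+1) : Nat) : Int) := by push_cast; ring
    rw [hcast, PySem.List.pyRange_one]
    simp only [Int.sub_zero, Int.toNat_natCast]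
    rw [List.map_map, List.map_map]
    apply List.map_congr_left
    intro i hi
    simp only [Function.comp_apply, zero_add]
    rw [decodeRev_natCast s.length (m+1) i]
    simp only [List.map_reverse, List.map_map]
    congr 1
    apply List.map_congr_left
    intro d hd
    have hdb : d < s.length := decodeNat_lt s.length hb (m+1) i d hd
    simp only [Function.comp_apply]
    rw [PySem.List.pyGet?_natCast]
    simp [List.getD_eq_getElem?_getD, List.getElem?_eq_getElem hdb]
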